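-- pv_equiv track=rewrite | github.com/alaalsalam/math_bell | math_bell/hints/engine.py | _no_borrow_sub
-- ===== SOURCE A (Python) =====
-- def _no_borrow_sub(a: int, b: int) -> int:
--     pa = abs(a)
--     pb = abs(b)
--     digits = []
--     while pa > 0 or pb > 0:
--         top = pa % 10
--         low = pb % 10
--         digits.append(abs(top - low))
--         pa //= 10
--         pb //= 10
--     return int("".join(str(d) for d in reversed(digits or [0])))
-- ===== SOURCE B (Python) =====
-- def _no_borrow_sub(a: int, b: int) -> int:
--     sa = str(abs(a))
--     sb = str(abs(b))
--     width = max(len(sa), len(sb))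
--     sa = sa.zfill(width)
--     sb = sb.zfill(width)
--     out = "".join(str(abs(int(x) - int(y))) for x, y in zip(sa, sb))
--     return int(out)
-- ===== Notes on version B (the rewrite author's own statement) =====
-- stated objective: alternative
-- what changed: B pairs decimal digits textually: both operands become zfill-padded strings scanned MSB-first in one zip, concatenating per-digit |x-y|, so the modular %10-//10 extraction loop, the digit list and the final reversal disappear (int() collapses leading zeros).
import Mathlib
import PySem

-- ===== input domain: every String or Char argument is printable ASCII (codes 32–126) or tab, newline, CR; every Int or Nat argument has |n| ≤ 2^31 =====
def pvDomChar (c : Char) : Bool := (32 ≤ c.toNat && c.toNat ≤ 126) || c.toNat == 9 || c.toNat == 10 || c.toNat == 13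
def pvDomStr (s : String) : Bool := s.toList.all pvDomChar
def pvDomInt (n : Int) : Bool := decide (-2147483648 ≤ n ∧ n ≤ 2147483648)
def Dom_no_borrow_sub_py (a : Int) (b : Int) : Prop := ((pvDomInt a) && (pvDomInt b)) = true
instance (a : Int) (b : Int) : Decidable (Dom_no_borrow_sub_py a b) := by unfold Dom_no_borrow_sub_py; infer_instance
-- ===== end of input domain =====

-- B replaces A's %10-//10 extraction loop + digit list + reversal by a single MSB-first
-- zip over the two zfill-padded decimal strings (alternative decomposition, same cost).

-- ===== PORT A =====
-- the 'while pa > 0 or pb > 0' loop of A, appending abs(pa%10 - pb%10) each turn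
def noBorrowLoopA (pa : Int) (pb : Int) (digits : List Int) : List Int :=
  if pa > 0 ∨ pb > 0 then
    noBorrowLoopA (PySem.Int.floordiv pa 10) (PySem.Int.floordiv pb 10)
      (digits ++ [|PySem.Int.mod pa 10 - PySem.Int.mod pb 10|])
  else digits
termination_by pa.toNat + pb.toNat
decreasing_by
  have h1 : pa.fdiv 10 = pa / 10 := by simp [Int.fdiv_eq_ediv]
  have h2 : pb.fdiv 10 = pb / 10 := by simp [Int.fdiv_eq_ediv]
  simp only [PySem.Int.floordiv, h1, h2]
  omega

-- int(...) on the joined digit string never raises (nonempty, digits only), so .getD 0 never fires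
def no_borrow_sub_py (a : Int) (b : Int) : Int :=
  let pa := |a|
  let pb := |b|
  let digits := noBorrowLoopA pa pb []
  (PySem.Int.ofChars? (PySem.Chars.join []
    ((if digits = [] then [(0 : Int)] else digits).reverse.map PySem.Int.toChars))).getD 0

-- ===== PORT B =====
-- int(x) on a single decimal-digit character never raises, so .getD 0 never fires
def no_borrow_sub_py_alt (a : Int) (b : Int) : Int :=
  let sa := PySem.Int.toChars |a|
  let sb := PySem.Int.toChars |b|
  let width : Int := max (sa.length : Int) (sb.length : Int)
  let sa' := PySem.Chars.zfill sa width
  let sb' := PySem.Chars.zfill sb width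
  let out := PySem.Chars.join [] ((sa'.zip sb').map (fun p =>
    PySem.Int.toChars |(PySem.Int.ofChars? [p.1]).getD 0 - (PySem.Int.ofChars? [p.2]).getD 0|))
  (PySem.Int.ofChars? out).getD 0

-- ===== PRECONDITION & SPEC =====
def Spec_no_borrow_sub_py (a : Int) (b : Int) (out : Int) : Prop := out = no_borrow_sub_py_alt a b
instance (a : Int) (b : Int) (out : Int) : Decidable (Spec_no_borrow_sub_py a b out) := by unfold Spec_no_borrow_sub_py; infer_instance

-- ===== CLAIM (what is proved, stated in full; the proofs are below) =====
def Claim_equal_no_borrow_sub_py : Prop := ∀ (a : Int) (b : Int), Dom_no_borrow_sub_py a b → Spec_no_borrow_sub_py a b (no_borrow_sub_py a b)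

-- ===== LEMMAS AND PROOFS =====

-- |x - y| on two Nats, as a Nat
def nd (x y : Nat) : Nat := ((x : Int) - (y : Int)).natAbs

-- the list of per-digit no-borrow differences, least-significant first
def nbs (pa pb : Nat) : List Nat :=
  if pa = 0 ∧ pb = 0 then [] else nd (pa % 10) (pb % 10) :: nbs (pa / 10) (pb / 10)
termination_by pa + pb
decreasing_by omega

-- pad with zeros at the most-significant (tail) end to length w
def padZ (xs : List Nat) (w : Nat) : List Nat := xs ++ List.replicate (w - xs.length) 0

lemma nbs_def (pa pb : Nat) :
    nbs pa pb = if pa = 0 ∧ pb = 0 then [] else nd (pa % 10) (pb % 10) :: nbs (pa / 10) (pb / 10) := by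
  rw [nbs]

lemma noBorrowLoopA_eq (pa pb : Nat) (acc : List Int) :
    noBorrowLoopA (pa : Int) (pb : Int) acc = acc ++ (nbs pa pb).map (fun d : Nat => (d : Int)) := by
  induction pa, pb using nbs.induct generalizing acc with
  | case1 pa pb h =>
    rw [noBorrowLoopA, nbs_def, if_neg (by omega), if_pos h]
    simp
  | case2 pa pb h ih =>
    have hm1 : PySem.Int.mod (pa : Int) 10 = ((pa % 10 : Nat) : Int) := by
      simp [PySem.Int.mod, Int.fmod_eq_emod]
    have hm2 : PySem.Int.mod (pb : Int) 10 = ((pb % 10 : Nat) : Int) := by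
      simp [PySem.Int.mod, Int.fmod_eq_emod]
    have hd1 : PySem.Int.floordiv (pa : Int) 10 = ((pa / 10 : Nat) : Int) := by
      simp [PySem.Int.floordiv, Int.fdiv_eq_ediv]
    have hd2 : PySem.Int.floordiv (pb : Int) 10 = ((pb / 10 : Nat) : Int) := by
      simp [PySem.Int.floordiv, Int.fdiv_eq_ediv]
    rw [noBorrowLoopA, nbs_def, if_pos (by omega), if_neg h, hm1, hm2, hd1, hd2, ih]
    simp [nd]

lemma nbs_lt_ten (pa pb : Nat) : ∀ x ∈ nbs pa pb, x < 10 := by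
  induction pa, pb using nbs.induct with
  | case1 pa pb h => rw [nbs_def, if_pos h]; simp
  | case2 pa pb h ih =>
    rw [nbs_def, if_neg h]
    intro x hx
    rcases List.mem_cons.mp hx with hx | hx
    · subst hx; unfold nd; omega
    · exact ih x hx

lemma padZ_step (n L : Nat) (hL : 1 ≤ L) :
    padZ (Nat.digits 10 n) L = n % 10 :: padZ (Nat.digits 10 (n / 10)) (L - 1) := by
  by_cases hz : n = 0
  · subst hz
    simp only [Nat.digits_zero, Nat.zero_mod, Nat.zero_div, padZ, List.nil_append,
      List.length_nil, Nat.sub_zero]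
    have hL' : L - 1 + 1 = L := by omega
    rw [← hL', List.replicate_succ]
    simp
  · rw [Nat.digits_def' (by norm_num : 1 < 10) (by omega)]
    simp only [padZ, List.length_cons, List.cons_append]
    have : L - ((Nat.digits 10 (n / 10)).length + 1) = L - 1 - (Nat.digits 10 (n / 10)).length := by
      omega
    rw [this]

lemma len_digits_div (n : Nat) :
    (Nat.digits 10 (n / 10)).length = (Nat.digits 10 n).length - 1 := by
  by_cases hz : n = 0
  · subst hz; simp
  · conv_rhs => rw [Nat.digits_def' (by norm_num : 1 < 10) (Nat.pos_of_ne_zero hz)]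
    simp

lemma len_digits_pos (n : Nat) (h : n ≠ 0) : 0 < (Nat.digits 10 n).length :=
  List.length_pos_iff.mpr (Nat.digits_ne_nil_iff_ne_zero.mpr h)

lemma nbs_eq_zipWith (pa pb : Nat) (L : Nat)
    (hL : L = max (Nat.digits 10 pa).length (Nat.digits 10 pb).length) :
    nbs pa pb = List.zipWith nd (padZ (Nat.digits 10 pa) L) (padZ (Nat.digits 10 pb) L) := by
  induction pa, pb using nbs.induct generalizing L with
  | case1 pa pb h =>
    obtain ⟨h1, h2⟩ := h; subst h1; subst h2
    have hL0 : L = 0 := by simpa using hL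
    rw [nbs_def]
    simp [hL0, padZ]
  | case2 pa pb h ih =>
    have hL1 : 1 ≤ L := by
      have hne : pa ≠ 0 ∨ pb ≠ 0 := by tauto
      rcases hne with hne | hne
      · have := len_digits_pos pa hne; omega
      · have := len_digits_pos pb hne; omega
    rw [nbs_def, if_neg h, padZ_step pa L hL1, padZ_step pb L hL1, List.zipWith_cons_cons]
    congr 1
    apply ih
    rw [len_digits_div, len_digits_div]
    omega

-- decimal printing characterised: Nat.toDigits is the reversed digitChar image of rep
def rep (n : Nat) : List Nat := if n = 0 then [0] else Nat.digits 10 n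

lemma toDigitsCore_eq (f : Nat) : ∀ (n : Nat) (acc : List Char), n < f →
    Nat.toDigitsCore 10 f n acc = ((rep n).map Nat.digitChar).reverse ++ acc := by
  induction f with
  | zero => intro n acc h; omega
  | succ f ih =>
    intro n acc h
    by_cases h0 : n / 10 = 0
    · have hn : n < 10 := by omega
      rw [Nat.toDigitsCore, if_pos h0]
      by_cases hz : n = 0
      · subst hz; rfl
      · rw [rep, if_neg hz, Nat.digits_def' (by norm_num : 1 < 10) (by omega), h0]
        simp [Nat.mod_eq_of_lt hn]
    · have hpos : 0 < n := by by_contra hc; omega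
      rw [Nat.toDigitsCore, if_neg h0, ih (n / 10) _ (by omega)]
      rw [show rep (n / 10) = Nat.digits 10 (n / 10) from by rw [rep]; exact if_neg h0]
      rw [show rep n = Nat.digits 10 n from by rw [rep]; exact if_neg (by omega)]
      rw [Nat.digits_def' (by norm_num : 1 < 10) hpos]
      simp

lemma toDigits_eq (n : Nat) :
    Nat.toDigits 10 n = ((rep n).map Nat.digitChar).reverse := by
  rw [Nat.toDigits, toDigitsCore_eq (n + 1) n [] (by omega)]
  simp

lemma rep_lt_ten (n : Nat) : ∀ x ∈ rep n, x < 10 := by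
  rw [rep]
  split
  · simp
  · exact fun x hx => Nat.digits_lt_base (by norm_num) hx

lemma rep_length (n : Nat) : (rep n).length = max 1 (Nat.digits 10 n).length := by
  rw [rep]
  split
  · next hz => subst hz; simp
  · next hz =>
    have : Nat.digits 10 n ≠ [] := Nat.digits_ne_nil_iff_ne_zero.mpr hz
    have : 0 < (Nat.digits 10 n).length := List.length_pos_iff.mpr this
    omega

lemma digitChar_ne_sign {d : Nat} (hd : d < 10) :
    Nat.digitChar d ≠ '+' ∧ Nat.digitChar d ≠ '-' := by
  interval_cases d <;> decide

lemma ofChars_digitChar {d : Nat} (hd : d < 10) :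
    PySem.Int.ofChars? [Nat.digitChar d] = some (d : Int) := by
  interval_cases d <;> decide

lemma toChars_digit {d : Nat} (hd : d < 10) :
    PySem.Int.toChars (d : Int) = [Nat.digitChar d] := by
  interval_cases d <;> decide

lemma join_singletons_digit (ds : List Nat) (h : ∀ x ∈ ds, x < 10) :
    PySem.Chars.join [] (ds.map (fun d : Nat => PySem.Int.toChars (d : Int)))
      = ds.map Nat.digitChar := by
  have h1 : ds.map (fun d : Nat => PySem.Int.toChars (d : Int))
      = (ds.map Nat.digitChar).map (fun c => [c]) := by
    rw [List.map_map]
    exact List.map_congr_left (fun d hd => toChars_digit (h d hd))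
  rw [h1, PySem.Chars.join_nil_singletons]

-- the decimal digit list (LSB-first) a nonneg int prints as, with a [0] for zero
def dsA (pa pb : Nat) : List Nat := if nbs pa pb = [] then [0] else nbs pa pb

def Wd (pa pb : Nat) : Nat := max (rep pa).length (rep pb).length

lemma dsA_lt (pa pb : Nat) : ∀ x ∈ dsA pa pb, x < 10 := by
  rw [dsA]
  split
  · simp
  · exact nbs_lt_ten pa pb

lemma toChars_natCast (n : Nat) : PySem.Int.toChars (n : Int) = Nat.toDigits 10 n := by
  simp [PySem.Int.toChars]

lemma rep_ne_nil (n : Nat) : rep n ≠ [] := by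
  rw [rep]
  split
  · simp
  · next hz => exact Nat.digits_ne_nil_iff_ne_zero.mpr hz

lemma padZ_length (u : List Nat) (w : Nat) (h : u.length ≤ w) : (padZ u w).length = w := by
  simp [padZ]; omega

lemma padZ_lt (u : List Nat) (w : Nat) (hu : ∀ x ∈ u, x < 10) : ∀ x ∈ padZ u w, x < 10 := by
  intro x hx
  rcases List.mem_append.mp hx with h | h
  · exact hu x h
  · have := List.eq_of_mem_replicate h; omega

lemma padZ_reverse (u : List Nat) (w : Nat) :
    (padZ u w).reverse = List.replicate (w - u.length) 0 ++ u.reverse := by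
  simp [padZ, List.reverse_append]

lemma padZ_rep (n w : Nat) (hw : 1 ≤ w) : padZ (rep n) w = padZ (Nat.digits 10 n) w := by
  rw [rep]
  split
  · next hz =>
    subst hz
    have h' : w - 1 + 1 = w := by omega
    simp only [padZ, List.length_cons, List.length_nil, Nat.digits_zero, List.nil_append,
      Nat.sub_zero]
    rw [← h', List.replicate_succ]
    simp
  · rfl

lemma zfill_no_sign (c : Char) (rest : List Char) (hc1 : c ≠ '+') (hc2 : c ≠ '-') (w : Nat) :
    PySem.Chars.zfill (c :: rest) (w : Int)
      = List.replicate (w - (c :: rest).length) '0' ++ (c :: rest) := by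
  rw [PySem.Chars.zfill]
  by_cases hw : (w : Int) ≤ ((c :: rest).length : Int)
  · rw [if_pos hw]
    have hw' : (w : Int) ≤ (rest.length : Int) + 1 := by simpa using hw
    have h0 : w - (c :: rest).length = 0 := by simp; omega
    rw [h0]
    simp
  · rw [if_neg hw]
    simp [hc1, hc2]

lemma zfill_digits (u : List Nat) (hu : ∀ x ∈ u, x < 10) (hne : u ≠ []) (w : Nat) :
    PySem.Chars.zfill (u.map Nat.digitChar) (w : Int)
      = (List.replicate (w - u.length) 0 ++ u).map Nat.digitChar := by
  obtain ⟨d, rest, rfl⟩ := List.exists_cons_of_ne_nil hne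
  have hd := digitChar_ne_sign (hu d (by simp))
  rw [List.map_cons, zfill_no_sign _ _ hd.1 hd.2 w]
  simp [List.map_replicate, show Nat.digitChar 0 = '0' from rfl]

lemma a_side (na nb : Nat) :
    PySem.Chars.join []
      ((if noBorrowLoopA (na : Int) (nb : Int) [] = [] then [(0 : Int)]
        else noBorrowLoopA (na : Int) (nb : Int) []).reverse.map PySem.Int.toChars)
    = (dsA na nb).reverse.map Nat.digitChar := by
  have hloop := noBorrowLoopA_eq na nb []
  rw [List.nil_append] at hloop
  have h_if : (if noBorrowLoopA (na : Int) (nb : Int) [] = [] then [(0 : Int)]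
      else noBorrowLoopA (na : Int) (nb : Int) [])
      = (dsA na nb).map (fun d : Nat => (d : Int)) := by
    rw [hloop]
    by_cases hnil : nbs na nb = []
    · simp [dsA, hnil]
    · rw [dsA, if_neg hnil, if_neg (by simpa using hnil)]
  rw [h_if]
  have h2 : ((dsA na nb).map (fun d : Nat => (d : Int))).reverse.map PySem.Int.toChars
      = ((dsA na nb).reverse).map (fun d : Nat => PySem.Int.toChars (d : Int)) := by
    simp [List.map_map, Function.comp]
  rw [h2, join_singletons_digit _ (fun x hx => dsA_lt na nb x (List.mem_reverse.mp hx))]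

lemma b_side (na nb : Nat) :
    PySem.Chars.join []
      (((PySem.Chars.zfill (PySem.Int.toChars (na : Int))
          (max ((PySem.Int.toChars (na : Int)).length : Int) ((PySem.Int.toChars (nb : Int)).length : Int))).zip
        (PySem.Chars.zfill (PySem.Int.toChars (nb : Int))
          (max ((PySem.Int.toChars (na : Int)).length : Int) ((PySem.Int.toChars (nb : Int)).length : Int)))).map (fun p =>
        PySem.Int.toChars |(PySem.Int.ofChars? [p.1]).getD 0 - (PySem.Int.ofChars? [p.2]).getD 0|))
    = ((List.zipWith nd (padZ (rep na) (Wd na nb)) (padZ (rep nb) (Wd na nb))).reverse).map Nat.digitChar := by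
  have hsa : PySem.Int.toChars (na : Int) = ((rep na).reverse).map Nat.digitChar := by
    rw [toChars_natCast, toDigits_eq]; simp
  have hsb : PySem.Int.toChars (nb : Int) = ((rep nb).reverse).map Nat.digitChar := by
    rw [toChars_natCast, toDigits_eq]; simp
  have hlena : (PySem.Int.toChars (na : Int)).length = (rep na).length := by rw [hsa]; simp
  have hlenb : (PySem.Int.toChars (nb : Int)).length = (rep nb).length := by rw [hsb]; simp
  have hw : max ((PySem.Int.toChars (na : Int)).length : Int) ((PySem.Int.toChars (nb : Int)).length : Int)
      = ((Wd na nb : Nat) : Int) := by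
    rw [hlena, hlenb, Wd]; push_cast; rfl
  rw [hw, hsa, hsb]
  have hma : ∀ x ∈ (rep na).reverse, x < 10 := fun x hx => rep_lt_ten na x (List.mem_reverse.mp hx)
  have hmb : ∀ x ∈ (rep nb).reverse, x < 10 := fun x hx => rep_lt_ten nb x (List.mem_reverse.mp hx)
  rw [zfill_digits _ hma (by simpa using rep_ne_nil na), zfill_digits _ hmb (by simpa using rep_ne_nil nb)]
  simp only [List.length_reverse]
  rw [← padZ_reverse, ← padZ_reverse]
  set U : List Nat := (padZ (rep na) (Wd na nb)).reverse with hU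
  set V : List Nat := (padZ (rep nb) (Wd na nb)).reverse with hV
  have hUlt : ∀ x ∈ U, x < 10 := fun x hx =>
    padZ_lt _ _ (rep_lt_ten na) x (List.mem_reverse.mp hx)
  have hVlt : ∀ x ∈ V, x < 10 := fun x hx =>
    padZ_lt _ _ (rep_lt_ten nb) x (List.mem_reverse.mp hx)
  rw [List.zip_map, List.map_map]
  have hcongr : (U.zip V).map ((fun p =>
        PySem.Int.toChars |(PySem.Int.ofChars? [p.1]).getD 0 - (PySem.Int.ofChars? [p.2]).getD 0|) ∘
        Prod.map Nat.digitChar Nat.digitChar)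
      = (U.zip V).map (fun p => [Nat.digitChar (nd p.1 p.2)]) := by
    apply List.map_congr_left
    intro p hp
    obtain ⟨hp1, hp2⟩ := List.of_mem_zip hp
    have h1 : p.1 < 10 := hUlt p.1 hp1
    have h2 : p.2 < 10 := hVlt p.2 hp2
    simp only [Function.comp_apply, Prod.map_fst, Prod.map_snd]
    rw [ofChars_digitChar h1, ofChars_digitChar h2]
    simp only [Option.getD_some]
    have habs : |((p.1 : Nat) : Int) - ((p.2 : Nat) : Int)| = ((nd p.1 p.2 : Nat) : Int) := by
      rw [Int.abs_eq_natAbs]; rfl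
    rw [habs, toChars_digit (by unfold nd; omega)]
  rw [hcongr]
  have hsingle : (U.zip V).map (fun p => [Nat.digitChar (nd p.1 p.2)])
      = (((U.zip V).map (fun p => nd p.1 p.2)).map Nat.digitChar).map (fun c => [c]) := by
    simp [List.map_map]
  rw [hsingle, PySem.Chars.join_nil_singletons]
  have hzip : (U.zip V).map (fun p => nd p.1 p.2) = List.zipWith nd U V := by
    simp [List.zip, List.map_zipWith]
  rw [hzip, hU, hV]
  have hlen : (padZ (rep na) (Wd na nb)).length = (padZ (rep nb) (Wd na nb)).length := by
    rw [padZ_length _ _ (by rw [Wd]; omega), padZ_length _ _ (by rw [Wd]; omega)]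
  rw [← List.reverse_zipWith hlen]

lemma dsA_eq_zipWith (na nb : Nat) :
    dsA na nb = List.zipWith nd (padZ (rep na) (Wd na nb)) (padZ (rep nb) (Wd na nb)) := by
  by_cases hz : na = 0 ∧ nb = 0
  · obtain ⟨h1, h2⟩ := hz; subst h1; subst h2
    rw [dsA, if_pos (by rw [nbs_def]; simp)]
    simp [Wd, rep, padZ, nd]
  · have hne : nbs na nb ≠ [] := by rw [nbs_def, if_neg hz]; simp
    rw [dsA, if_neg hne]
    have hW1 : 1 ≤ Wd na nb := by rw [Wd, rep_length, rep_length]; omega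
    rw [padZ_rep na _ hW1, padZ_rep nb _ hW1]
    apply nbs_eq_zipWith
    rw [Wd, rep_length, rep_length]
    have hor : na ≠ 0 ∨ nb ≠ 0 := by tauto
    rcases hor with h | h
    · have := len_digits_pos na h; omega
    · have := len_digits_pos nb h; omega

-- the strings the two ports feed to int() are equal
lemma strings_eq (a b : Int) :
    PySem.Chars.join []
      ((if noBorrowLoopA |a| |b| [] = [] then [(0 : Int)] else noBorrowLoopA |a| |b| []).reverse.map PySem.Int.toChars)
    = PySem.Chars.join []
        (((PySem.Chars.zfill (PySem.Int.toChars |a|) (max ((PySem.Int.toChars |a|).length : Int) ((PySem.Int.toChars |b|).length : Int))).zip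
          (PySem.Chars.zfill (PySem.Int.toChars |b|) (max ((PySem.Int.toChars |a|).length : Int) ((PySem.Int.toChars |b|).length : Int)))).map (fun p =>
          PySem.Int.toChars |(PySem.Int.ofChars? [p.1]).getD 0 - (PySem.Int.ofChars? [p.2]).getD 0|)) := by
  rw [Int.abs_eq_natAbs a, Int.abs_eq_natAbs b, a_side, b_side, dsA_eq_zipWith]

-- ===== VERDICT (by name: the statement is the Claim_ definition above) =====
theorem no_borrow_sub_py_spec : Claim_equal_no_borrow_sub_py := by
  intro a b _
  unfold Spec_no_borrow_sub_py no_borrow_sub_py no_borrow_sub_py_alt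
  simp only []
  rw [strings_eq a b]
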